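-- pv_equiv track=rewrite | github.com/haodadaxiangyaofei/luogu | P1028.py | dg
-- ===== SOURCE A (Python) =====
-- def dg(a):
--     count = 1
--     if(a==1):
--         return 1
--     for i in range(1,a//2+1):
--         if(i in dic):
--             dgi = dic[i]
--         else:
--             dgi = dg(i)
--             dic[i] = dgi
--         count = count+dgi
--     return count
--
-- dic= {}
-- ===== SOURCE B (Python) =====
-- def dg(a):
--     if a <= 1:
--         return 1
--     # pref[k] = sum of dg(1..k); dg(n) = 1 + pref[n//2], so pref[n] = pref[n-1] + 1 + pref[n//2]
--     pref = [0, 1]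
--     for n in range(2, a + 1):
--         pref.append(pref[-1] + 1 + pref[n // 2])
--     return pref[a] - pref[a - 1]
-- ===== Notes on version B (the rewrite author's own statement) =====
-- stated objective: faster
-- what changed: replaces the memoized recursion that re-sums dg(1..a//2) with a single iterative prefix-sum pass using dg(n) = 1 + prefix(n//2)
import Mathlib
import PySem

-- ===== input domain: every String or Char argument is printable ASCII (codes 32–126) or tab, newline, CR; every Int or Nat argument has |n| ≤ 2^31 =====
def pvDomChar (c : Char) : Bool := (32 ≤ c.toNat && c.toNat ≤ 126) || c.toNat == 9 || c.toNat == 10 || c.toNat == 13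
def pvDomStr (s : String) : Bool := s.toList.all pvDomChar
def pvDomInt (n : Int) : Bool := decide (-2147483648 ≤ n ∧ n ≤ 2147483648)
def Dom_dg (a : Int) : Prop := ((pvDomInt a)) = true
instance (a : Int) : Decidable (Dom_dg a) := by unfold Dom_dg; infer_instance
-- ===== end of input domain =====

-- B replaces A's memoized recursion by one iterative prefix-sum pass (dg(n) = 1 + prefix(n//2)); the equivalence is about
-- the return value (Python A also fills the module-level memo dict `dic`, which never changes any returned value).

-- ===== PORT A =====
-- A's global memo dict is threaded through the recursion as explicit state (empty at each top-level call;
-- it only ever caches already-computed dg values, so the returned value is the same as with the persistent global).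
def dgA (a : Int) (dic : Std.HashMap Int Int) : Int × Std.HashMap Int Int :=
  if a == 1 then (1, dic)
  else
    (PySem.List.pyRange 1 (PySem.Int.floordiv a 2 + 1) 1).attach.foldl
      (fun st ip =>
        if st.2.contains ip.1 then (st.1 + st.2.getD ip.1 0, st.2)
        else
          let p := dgA ip.1 st.2
          (st.1 + p.1, p.2.insert ip.1 p.1))
      (1, dic)
termination_by a.toNat
decreasing_by
  have h := PySem.List.mem_pyRange_one.mp ip.2
  have he : PySem.Int.floordiv a 2 = a / 2 := PySem.Int.floordiv_eq_ediv_of_pos (by omega)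
  omega

def dg (a : Int) : Int := (dgA a ∅).1

-- ===== PORT B =====
def dgAltStep (pref : List Int) (n : Int) : List Int :=
  pref ++ [PySem.List.pyGetD pref (-1) 0 + 1 + PySem.List.pyGetD pref (PySem.Int.floordiv n 2) 0]

def dg_alt (a : Int) : Int :=
  if a ≤ 1 then 1
  else
    let pref := (PySem.List.pyRange 2 (a + 1) 1).foldl dgAltStep [0, 1]
    PySem.List.pyGetD pref a 0 - PySem.List.pyGetD pref (a - 1) 0

-- ===== PRECONDITION & SPEC =====
def Spec_dg (a : Int) (out : Int) : Prop := out = dg_alt a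
instance (a : Int) (out : Int) : Decidable (Spec_dg a out) := by unfold Spec_dg; infer_instance

-- ===== CLAIM (what is proved, stated in full; the proofs are below) =====
def Claim_equal_dg : Prop := ∀ (a : Int), Dom_dg a → Spec_dg a (dg a)

-- ===== LEMMAS AND PROOFS =====

-- The pure value of A's recursion, memo forgotten.
def F (a : Int) : Int :=
  if a ≤ 1 then 1
  else 1 + ((PySem.List.pyRange 1 (PySem.Int.floordiv a 2 + 1) 1).attach.map (fun ip => F ip.1)).sum
termination_by a.toNat
decreasing_by
  have h := PySem.List.mem_pyRange_one.mp ip.2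
  have he : PySem.Int.floordiv a 2 = a / 2 := PySem.Int.floordiv_eq_ediv_of_pos (by omega)
  omega

-- S n = F 1 + … + F n
def S (n : Nat) : Int := (((List.range n).map (fun k : Nat => (1 : Int) + (k : Int))).map F).sum

theorem F_le_one (a : Int) (h : a ≤ 1) : F a = 1 := by
  rw [F.eq_def]; simp [h]

theorem attach_sum_F (l : List Int) :
    (l.attach.map (fun ip => F ip.1)).sum = (l.map F).sum := by
  rw [List.attach_map_val]

theorem F_eq (a : Int) (h : 2 ≤ a) : F a = 1 + S ((a / 2).toNat) := by
  have he : PySem.Int.floordiv a 2 = a / 2 := PySem.Int.floordiv_eq_ediv_of_pos (by omega)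
  rw [F.eq_def, if_neg (by omega), attach_sum_F, he, PySem.List.pyRange_one]
  have h2 : (a / 2 + 1 - 1) = a / 2 := by ring
  rw [h2]
  unfold S
  rfl

theorem S_succ (n : Nat) : S (n + 1) = S n + F (1 + (n : Int)) := by
  simp [S, List.range_succ]

-- every value cached in the dict is the corresponding F-value
def GoodDic (dic : Std.HashMap Int Int) : Prop := ∀ k v, dic[k]? = some v → v = F k

theorem dgALoop_eq (a : Int)
    (IH : ∀ i : Int, 1 ≤ i → i < PySem.Int.floordiv a 2 + 1 →
      ∀ dic : Std.HashMap Int Int, GoodDic dic → (dgA i dic).1 = F i ∧ GoodDic (dgA i dic).2) :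
    ∀ (L : List {x // x ∈ PySem.List.pyRange 1 (PySem.Int.floordiv a 2 + 1) 1})
      (c : Int) (dic : Std.HashMap Int Int), GoodDic dic →
      (L.foldl (fun st ip =>
          if st.2.contains ip.1 then (st.1 + st.2.getD ip.1 0, st.2)
          else
            let p := dgA ip.1 st.2
            (st.1 + p.1, p.2.insert ip.1 p.1)) (c, dic)).1
        = c + (L.map (fun ip => F ip.1)).sum
      ∧ GoodDic ((L.foldl (fun st ip =>
          if st.2.contains ip.1 then (st.1 + st.2.getD ip.1 0, st.2)
          else
            let p := dgA ip.1 st.2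
            (st.1 + p.1, p.2.insert ip.1 p.1)) (c, dic)).2) := by
  intro L
  induction L with
  | nil => intro c dic hg; exact ⟨by simp, hg⟩
  | cons ip rest ihL =>
    intro c dic hg
    obtain ⟨hi1, hi2⟩ := PySem.List.mem_pyRange_one.mp ip.2
    simp only [List.foldl_cons, List.map_cons, List.sum_cons]
    by_cases hc : dic.contains ip.1 = true
    · -- cached value: it is F ip.1 by GoodDic
      have hsome : ∃ v, dic[ip.1]? = some v := by
        have h2 : dic.contains ip.1 = dic[ip.1]?.isSome :=
          Std.HashMap.contains_eq_isSome_getElem?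
        rw [hc] at h2
        exact Option.isSome_iff_exists.mp h2.symm
      obtain ⟨v, hv⟩ := hsome
      have hget : dic.getD ip.1 0 = v := by
        simp [Std.HashMap.getD_eq_getD_getElem?, hv]
      rw [if_pos hc, hget, hg _ _ hv]
      have hrec := ihL (c + F ip.1) dic hg
      exact ⟨by rw [hrec.1]; ring, hrec.2⟩
    · -- fresh value: computed by the recursive call, then inserted
      have hIH := IH ip.1 hi1 hi2 dic hg
      have hgood' : GoodDic ((dgA ip.1 dic).2.insert ip.1 (dgA ip.1 dic).1) := by
        intro k v hk
        rw [Std.HashMap.getElem?_insert] at hk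
        split at hk
        · rename_i hx
          have hxe : ip.1 = k := by simpa using hx
          subst hxe
          rw [(Option.some_inj.mp hk).symm, hIH.1]
        · exact hIH.2 _ _ hk
      rw [if_neg hc]
      have hrec := ihL (c + (dgA ip.1 dic).1)
        ((dgA ip.1 dic).2.insert ip.1 (dgA ip.1 dic).1) hgood'
      exact ⟨hrec.1.trans (by rw [hIH.1]; ring), hrec.2⟩

theorem dgA_eq : ∀ (n : Nat) (a : Int), a.toNat = n → ∀ dic : Std.HashMap Int Int, GoodDic dic →
    (dgA a dic).1 = F a ∧ GoodDic (dgA a dic).2 := by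
  intro n
  induction n using Nat.strong_induction_on with
  | _ n ihn =>
    intro a hn dic hg
    rw [dgA.eq_def]
    by_cases h1 : a = 1
    · subst h1
      simpa using ⟨(F_le_one 1 (by omega)).symm, hg⟩
    · rw [if_neg (by simp [h1])]
      have he : PySem.Int.floordiv a 2 = a / 2 := PySem.Int.floordiv_eq_ediv_of_pos (by omega)
      have IH' : ∀ i : Int, 1 ≤ i → i < PySem.Int.floordiv a 2 + 1 →
          ∀ dic' : Std.HashMap Int Int, GoodDic dic' →
          (dgA i dic').1 = F i ∧ GoodDic (dgA i dic').2 := by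
        intro i hi1 hi2 dic' hg'
        exact ihn i.toNat (by omega) i rfl dic' hg'
      have hloop := dgALoop_eq a IH'
        (PySem.List.pyRange 1 (PySem.Int.floordiv a 2 + 1) 1).attach 1 dic hg
      refine ⟨?_, hloop.2⟩
      rw [hloop.1]
      by_cases ha : a ≤ 1
      · -- a ≤ 0 here: the range is empty and both sides are 1
        have hnil : PySem.List.pyRange 1 (a / 2 + 1) 1 = [] :=
          PySem.List.pyRange_one_eq_nil (by omega)
        rw [F_le_one a ha, attach_sum_F, he, hnil]
        simp
      · rw [F.eq_def, if_neg ha]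

-- ===== B-side: the prefix list after the loop is [S 0, S 1, …] =====

theorem step_eq (m : Nat) (hm : 1 ≤ m) :
    dgAltStep ((List.range (m + 1)).map (fun j => S j)) ((m : Int) + 1)
      = (List.range (m + 2)).map (fun j => S j) := by
  have hq : PySem.Int.floordiv ((m : Int) + 1) 2 = ((m : Int) + 1) / 2 :=
    PySem.Int.floordiv_eq_ediv_of_pos (by omega)
  have hq1 : (1 : Int) ≤ ((m : Int) + 1) / 2 := by omega
  have hqm : ((m : Int) + 1) / 2 ≤ (m : Int) := by omega
  unfold dgAltStep
  have hlast : PySem.List.pyGetD ((List.range (m + 1)).map (fun j => S j)) (-1) 0 = S m := by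
    rw [PySem.List.pyGetD_neg_ofNat _ 1 0 (by omega) (by simp)]
    simp only [List.length_map, List.length_range, List.getElem_map, List.getElem_range]
    norm_num
  have hmid : PySem.List.pyGetD ((List.range (m + 1)).map (fun j => S j))
      (PySem.Int.floordiv ((m : Int) + 1) 2) 0 = S ((((m : Int) + 1) / 2).toNat) := by
    rw [hq, PySem.List.pyGetD_eq_getElem _ _ (by omega)
      (by simp only [List.length_map, List.length_range]; omega)]
    simp only [List.getElem_map, List.getElem_range]
  rw [hlast, hmid]
  have hF : F (1 + (m : Int)) = 1 + S ((((m : Int) + 1) / 2).toNat) := by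
    rw [F_eq (1 + (m : Int)) (by omega)]
    congr 2
    omega
  have hS : S m + 1 + S ((((m : Int) + 1) / 2).toNat) = S (m + 1) := by
    rw [S_succ, hF]; ring
  have h9 : (List.range (m + 2)).map (fun j => S j)
      = (List.range (m + 1)).map (fun j => S j) ++ [S (m + 1)] := by
    rw [show m + 2 = m + 1 + 1 from rfl, List.range_succ, List.map_append]
    rfl
  rw [hS, h9]

theorem Bloop (k : Nat) : ∀ (m : Nat), 1 ≤ m →
    (PySem.List.pyRange ((m : Int) + 1) ((m : Int) + 1 + (k : Int)) 1).foldl dgAltStep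
      ((List.range (m + 1)).map (fun j => S j))
    = (List.range (m + 1 + k)).map (fun j => S j) := by
  induction k with
  | zero =>
    intro m hm
    rw [show ((m : Int) + 1 + ((0 : Nat) : Int)) = (m : Int) + 1 by push_cast; ring]
    rw [PySem.List.pyRange_one_eq_nil (by omega)]
    rfl
  | succ k ih =>
    intro m hm
    rw [PySem.List.pyRange_one_cons (by push_cast; omega)]
    rw [List.foldl_cons, step_eq m hm]
    have h2 := ih (m + 1) (by omega)
    rw [show ((m : Int) + 1 + ((k + 1 : Nat) : Int)) = (((m + 1 : Nat) : Int) + 1 + (k : Int)) by push_cast; ring]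
    rw [show ((m : Int) + 1 + 1) = (((m + 1 : Nat) : Int) + 1) by push_cast; ring]
    rw [h2]
    rw [show m + 1 + 1 + k = m + 1 + (k + 1) by omega]

-- ===== putting it together =====

theorem dg_eq_F (a : Int) : dg a = F a := by
  have hg : GoodDic (∅ : Std.HashMap Int Int) := by
    intro k v hv
    simp at hv
  exact (dgA_eq a.toNat a rfl ∅ hg).1

theorem dg_alt_eq_F (a : Int) : dg_alt a = F a := by
  by_cases ha : a ≤ 1
  · rw [dg_alt, if_pos ha, F_le_one a ha]
  · rw [dg_alt, if_neg ha]
    have hstart : ([0, 1] : List Int) = (List.range (1 + 1)).map (fun j => S j) := by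
      simp [List.range_succ, S, F_le_one 1 (by omega)]
    have hend : (a + 1) = ((1 : Nat) : Int) + 1 + ((a - 1).toNat : Int) := by omega
    have hpref : (PySem.List.pyRange 2 (a + 1) 1).foldl dgAltStep [0, 1]
        = (List.range (a.toNat + 1)).map (fun j => S j) := by
      rw [hstart, show (2 : Int) = ((1 : Nat) : Int) + 1 by norm_num, hend,
        Bloop ((a - 1).toNat) 1 (by omega)]
      congr 2
      omega
    rw [hpref]
    have hA : PySem.List.pyGetD ((List.range (a.toNat + 1)).map (fun j => S j)) a 0
        = S a.toNat := by
      rw [PySem.List.pyGetD_eq_getElem _ _ (by omega)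
        (by simp only [List.length_map, List.length_range]; omega)]
      simp only [List.getElem_map, List.getElem_range]
    have hB : PySem.List.pyGetD ((List.range (a.toNat + 1)).map (fun j => S j)) (a - 1) 0
        = S (a.toNat - 1) := by
      rw [PySem.List.pyGetD_eq_getElem _ _ (by omega)
        (by simp only [List.length_map, List.length_range]; omega)]
      simp only [List.getElem_map, List.getElem_range]
      congr 1
      omega
    show PySem.List.pyGetD ((List.range (a.toNat + 1)).map (fun j => S j)) a 0
        - PySem.List.pyGetD ((List.range (a.toNat + 1)).map (fun j => S j)) (a - 1) 0 = F a
    rw [hA, hB]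
    obtain ⟨m, hm⟩ : ∃ m, a.toNat = m + 1 := ⟨a.toNat - 1, by omega⟩
    rw [hm, S_succ, show m + 1 - 1 = m by omega,
      show (1 + (m : Int)) = a by omega]
    ring

-- ===== VERDICT (by name: the statement is the Claim_ definition above) =====
theorem dg_spec : Claim_equal_dg := by
  intro a _
  unfold Spec_dg
  rw [dg_eq_F, dg_alt_eq_F]
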